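-- pv_equiv track=rewrite | github.com/Shumail-Fatima/bmp-images-and-convolution-kernel-application- | laplacian edge convo.py | apply_convolution
-- ===== SOURCE A (Python) =====
-- mask = [[-1,-1,-1],
--                   [-1,8,-1],
--                   [-1,-1,-1]]
--
-- def clamp(value):
--     return max(0, min(255, value))
--
-- def apply_convolution(pixels, height, width):
--     output = [[[0, 0, 0] for _ in range(width)] for _ in range(height)]
--
--     for y in range(1, height - 1):
--         for x in range(1, width - 1):
--             for color in range(3):  # Process each color channel separately
--                 new_value = 0
--                 for ky in range(-1, 2):
--                     for kx in range(-1, 2):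
--                         new_value += pixels[y + ky][x + kx][color] * mask[ky + 1][kx + 1]
--                 output[y][x][color] = clamp(new_value)
--
--     return output
-- ===== SOURCE B (Python) =====
-- mask = [[-1,-1,-1],
--                   [-1,8,-1],
--                   [-1,-1,-1]]
--
-- def clamp(value):
--     return max(0, min(255, value))
--
-- def apply_convolution(pixels, height, width):
--     # Separable reformulation: kernel value = 9*center - (3x3 window sum);
--     # the window sum is built from horizontal 3-sums H, then combined vertically.
--     if height < 3 or width < 3:
--         return [[[0, 0, 0] for _ in range(width)] for _ in range(height)]
--     H = [[[pixels[y][x-1][c] + pixels[y][x][c] + pixels[y][x+1][c] for c in range(3)]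
--           for x in range(1, width - 1)] for y in range(height)]
--     result = []
--     for y in range(height):
--         if y == 0 or y == height - 1:
--             result.append([[0, 0, 0] for _ in range(width)])
--         else:
--             interior = [[clamp(9 * pixels[y][x][c] - (H[y-1][x-1][c] + H[y][x-1][c] + H[y+1][x-1][c]))
--                          for c in range(3)] for x in range(1, width - 1)]
--             result.append([[0, 0, 0]] + interior + [[0, 0, 0]])
--     return result
-- ===== Notes on version B (the rewrite author's own statement) =====
-- stated objective: alternative
-- what changed: B replaces A's per-pixel 9-tap mask loop and in-place mutation of a preallocated grid by a separable two-pass scheme: it first builds a table of horizontal 3-sums, then emits each output row directly as clamp(9*center - vertical combination of three 3-sums), with border rows/cells produced as literals.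
import Mathlib
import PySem

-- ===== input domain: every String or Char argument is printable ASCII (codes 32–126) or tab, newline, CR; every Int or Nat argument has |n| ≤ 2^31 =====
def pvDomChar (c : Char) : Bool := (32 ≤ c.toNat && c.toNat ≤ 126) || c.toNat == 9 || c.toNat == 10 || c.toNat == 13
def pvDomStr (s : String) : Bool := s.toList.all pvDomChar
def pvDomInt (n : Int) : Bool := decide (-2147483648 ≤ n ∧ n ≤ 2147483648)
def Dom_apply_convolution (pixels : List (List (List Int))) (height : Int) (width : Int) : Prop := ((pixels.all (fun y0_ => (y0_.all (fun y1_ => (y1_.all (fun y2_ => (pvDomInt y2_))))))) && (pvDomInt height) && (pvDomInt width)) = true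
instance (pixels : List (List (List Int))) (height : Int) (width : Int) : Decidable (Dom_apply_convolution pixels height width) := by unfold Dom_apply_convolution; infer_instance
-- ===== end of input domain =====

-- B replaces the 9-tap kernel loop at every pixel by a separable two-pass scheme
-- (horizontal 3-sums, then 9*center minus the vertical combination); objective: alternative.

-- ===== PORT A =====
-- shared subscript helper: a[y][x][c] via Python indexing semantics (total form; Pre_ excludes out-of-range)
def pvGet3 (a : List (List (List Int))) (y x c : Int) : Int :=
  PySem.List.pyGetD (PySem.List.pyGetD (PySem.List.pyGetD a y []) x []) c 0

def pvClamp (value : Int) : Int := max 0 (min 255 value)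

def pvMask : List (List Int) := [[-1,-1,-1],[-1,8,-1],[-1,-1,-1]]

def apply_convolution (pixels : List (List (List Int))) (height : Int) (width : Int) : List (List (List Int)) :=
  let output := (PySem.List.pyRange 0 height 1).map (fun _ =>
    (PySem.List.pyRange 0 width 1).map (fun _ => ([0,0,0] : List Int)))
  (PySem.List.pyRange 1 (height-1) 1).foldl (fun output y =>
    (PySem.List.pyRange 1 (width-1) 1).foldl (fun output x =>
      (PySem.List.pyRange 0 3 1).foldl (fun output c =>
        let new_value : Int := (PySem.List.pyRange (-1) 2 1).foldl (fun nv ky =>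
          (PySem.List.pyRange (-1) 2 1).foldl (fun nv kx =>
            nv + pvGet3 pixels (y+ky) (x+kx) c *
              PySem.List.pyGetD (PySem.List.pyGetD pvMask (ky+1) []) (kx+1) 0) nv) 0
        output.modify y.toNat (fun row => row.modify x.toNat (fun p => p.set c.toNat (pvClamp new_value)))
      ) output) output) output

-- ===== PORT B =====
def apply_convolution_alt (pixels : List (List (List Int))) (height : Int) (width : Int) : List (List (List Int)) :=
  if height < 3 ∨ width < 3 then
    (PySem.List.pyRange 0 height 1).map (fun _ =>
      (PySem.List.pyRange 0 width 1).map (fun _ => ([0,0,0] : List Int)))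
  else
    let H : List (List (List Int)) := (PySem.List.pyRange 0 height 1).map (fun y =>
      (PySem.List.pyRange 1 (width-1) 1).map (fun x =>
        (PySem.List.pyRange 0 3 1).map (fun c =>
          pvGet3 pixels y (x-1) c + pvGet3 pixels y x c + pvGet3 pixels y (x+1) c)))
    (PySem.List.pyRange 0 height 1).map (fun y =>
      if y = 0 ∨ y = height - 1 then
        (PySem.List.pyRange 0 width 1).map (fun _ => ([0,0,0] : List Int))
      else
        [([0,0,0] : List Int)] ++
        (PySem.List.pyRange 1 (width-1) 1).map (fun x =>
          (PySem.List.pyRange 0 3 1).map (fun c =>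
            pvClamp (9 * pvGet3 pixels y x c -
              (pvGet3 H (y-1) (x-1) c + pvGet3 H y (x-1) c + pvGet3 H (y+1) (x-1) c)))) ++
        [([0,0,0] : List Int)])

-- ===== PRECONDITION & SPEC =====
-- Pre_ excludes exactly the inputs where Python A raises IndexError: when both loops are
-- non-empty (3 ≤ height and 3 ≤ width), the first height rows must each hold at least
-- width pixels of at least 3 channels.
def Pre_apply_convolution (pixels : List (List (List Int))) (height : Int) (width : Int) : Prop :=
  (3 ≤ height ∧ 3 ≤ width) →
    (height.toNat ≤ pixels.length ∧
      ∀ row ∈ pixels.take height.toNat, width.toNat ≤ row.length ∧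
        ∀ p ∈ row.take width.toNat, 3 ≤ p.length)
instance (pixels : List (List (List Int))) (height : Int) (width : Int) : Decidable (Pre_apply_convolution pixels height width) := by unfold Pre_apply_convolution; infer_instance

def pvWitness_apply_convolution : List (List (List Int)) × Int × Int :=
  ([[[10,20,30],[1,2,3],[4,5,6]], [[7,8,9],[100,100,100],[0,0,0]], [[1,1,1],[2,2,2],[3,3,3]]], 3, 3)

def Spec_apply_convolution (pixels : List (List (List Int))) (height : Int) (width : Int) (out : List (List (List Int))) : Prop := out = apply_convolution_alt pixels height width
instance (pixels : List (List (List Int))) (height : Int) (width : Int) (out : List (List (List Int))) : Decidable (Spec_apply_convolution pixels height width out) := by unfold Spec_apply_convolution; infer_instance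

-- ===== CLAIM (what is proved, stated in full; the proofs are below) =====
def Claim_equal_apply_convolution : Prop := ∀ (pixels : List (List (List Int))) (height : Int) (width : Int), Dom_apply_convolution pixels height width → Pre_apply_convolution pixels height width → Spec_apply_convolution pixels height width (apply_convolution pixels height width)

-- ===== LEMMAS AND PROOFS =====

theorem pv_modify_modify {α : Type} (l : List α) (k : Nat) (f g : α → α) :
    (l.modify k f).modify k g = l.modify k (fun a => g (f a)) := by
  apply List.ext_getElem?
  intro n
  simp only [List.getElem?_modify]
  cases l[n]? <;> by_cases h : k = n <;> simp [h]

theorem pv_foldl_modify_same {α β : Type} (l : List β) (k : Nat) (f : β → α → α) (g : List α) :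
    l.foldl (fun g b => g.modify k (f b)) g = g.modify k (fun a => l.foldl (fun a b => f b a) a) := by
  induction l generalizing g with
  | nil =>
    simp only [List.foldl_nil]
    apply List.ext_getElem?
    intro n
    simp [List.getElem?_modify]
  | cons b t ih => simp only [List.foldl_cons]; rw [ih, pv_modify_modify]

theorem pv_foldl_modify_pyRange {α : Type} (F : Int → α → α) (b : Int) (n : Nat) :
    ∀ (a : Int), 0 ≤ a → (b - a).toNat = n → ∀ (g : List α) (j : Nat),
    ((PySem.List.pyRange a b 1).foldl (fun g i => g.modify i.toNat (F i)) g)[j]? =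
      if a ≤ (j:Int) ∧ (j:Int) < b then (g[j]?).map (F (j:Int)) else g[j]? := by
  induction n with
  | zero =>
    intro a ha hn g j
    rw [PySem.List.pyRange_one_eq_nil (by omega)]
    simp only [List.foldl_nil]
    rw [if_neg (by omega)]
  | succ n ih =>
    intro a ha hn g j
    rw [PySem.List.pyRange_one_cons (by omega)]
    simp only [List.foldl_cons]
    rw [ih (a+1) (by omega) (by omega)]
    by_cases hj : (j:Int) = a
    · have hja : j = a.toNat := by omega
      rw [if_neg (by omega), if_pos (by omega)]
      rw [← hj]
      simp [hja]
      rw [show max a 0 = a from by omega]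
      simp
    · have hja : a.toNat ≠ j := by omega
      by_cases hc : a + 1 ≤ (j:Int) ∧ (j:Int) < b
      · rw [if_pos hc, if_pos (by omega)]
        simp [hja]
      · rw [if_neg hc, if_neg (by omega)]
        simp [hja]

theorem pv_foldl_modify_pyRange' {α : Type} (F : Int → α → α) (a b : Int) (h0 : 0 ≤ a) (g : List α) (j : Nat) :
    ((PySem.List.pyRange a b 1).foldl (fun g i => g.modify i.toNat (F i)) g)[j]? =
      if a ≤ (j:Int) ∧ (j:Int) < b then (g[j]?).map (F (j:Int)) else g[j]? :=
  pv_foldl_modify_pyRange F b (b - a).toNat a h0 rfl g j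

theorem pv_foldl_id {α β : Type} (l : List β) (g : α) : l.foldl (fun g _ => g) g = g := by
  induction l generalizing g with
  | nil => rfl
  | cons b t ih => exact ih g

-- A's raw kernel accumulation at one pixel/channel
def pvNV (pixels : List (List (List Int))) (y x c : Int) : Int :=
  (PySem.List.pyRange (-1) 2 1).foldl (fun nv ky =>
    (PySem.List.pyRange (-1) 2 1).foldl (fun nv kx =>
      nv + pvGet3 pixels (y+ky) (x+kx) c *
        PySem.List.pyGetD (PySem.List.pyGetD pvMask (ky+1) []) (kx+1) 0) nv) 0

def pvPx (pixels : List (List (List Int))) (y x : Int) (p : List Int) : List Int :=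
  (PySem.List.pyRange 0 3 1).foldl (fun p c => p.set c.toNat (pvClamp (pvNV pixels y x c))) p

def pvRow (pixels : List (List (List Int))) (w y : Int) (row : List (List Int)) : List (List Int) :=
  (PySem.List.pyRange 1 (w-1) 1).foldl (fun row x => row.modify x.toNat (pvPx pixels y x)) row

-- B's horizontal 3-sum table
def pvH (pixels : List (List (List Int))) (height width : Int) : List (List (List Int)) :=
  (PySem.List.pyRange 0 height 1).map (fun y =>
    (PySem.List.pyRange 1 (width-1) 1).map (fun x =>
      (PySem.List.pyRange 0 3 1).map (fun c =>
        pvGet3 pixels y (x-1) c + pvGet3 pixels y x c + pvGet3 pixels y (x+1) c)))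

theorem pv_nv_eq (pixels : List (List (List Int))) (y x c : Int) :
    pvNV pixels y x c
    = 9 * pvGet3 pixels y x c -
      ((pvGet3 pixels (y-1) (x-1) c + pvGet3 pixels (y-1) x c + pvGet3 pixels (y-1) (x+1) c) +
       (pvGet3 pixels y (x-1) c + pvGet3 pixels y x c + pvGet3 pixels y (x+1) c) +
       (pvGet3 pixels (y+1) (x-1) c + pvGet3 pixels (y+1) x c + pvGet3 pixels (y+1) (x+1) c)) := by
  unfold pvNV
  rw [show PySem.List.pyRange (-1) 2 1 = [-1,0,1] from by decide]
  simp only [List.foldl_cons, List.foldl_nil]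
  norm_num [pvMask, PySem.List.pyGetD, PySem.List.pyGet?, PySem.List.pyIdx?,
    show Int.toNat 2 = 2 from rfl]
  ring_nf

theorem pv_px_eval (v : Int → Int) :
    (PySem.List.pyRange 0 3 1).foldl (fun p c => p.set c.toNat (v c)) ([0,0,0] : List Int)
      = [v 0, v 1, v 2] := by
  rw [show PySem.List.pyRange 0 3 1 = [0,1,2] from by decide]
  simp [List.set]

theorem pv_pyGetD_map_pyRange_one_int {α : Type} (f : Int → α) (a b i : Int) (d : α)
    (h0 : 0 ≤ i) (h1 : i < b - a) :
    PySem.List.pyGetD ((PySem.List.pyRange a b 1).map f) i d = f (a + i) := by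
  have hk : i = ((i.toNat : Nat) : Int) := by omega
  rw [hk, PySem.List.pyGetD_map_pyRange_one f a b i.toNat d (by omega)]

theorem pv_getH (pixels : List (List (List Int))) (h w yp x c : Int)
    (hy0 : 0 ≤ yp) (hy1 : yp < h) (hx0 : 1 ≤ x) (hx1 : x < w - 1) (hc0 : 0 ≤ c) (hc1 : c < 3) :
    pvGet3 (pvH pixels h w) yp (x-1) c
      = pvGet3 pixels yp (x-1) c + pvGet3 pixels yp x c + pvGet3 pixels yp (x+1) c := by
  unfold pvH pvGet3
  rw [PySem.List.pyGetD_map_pyRange_of_nonneg _ _ _ _ hy0 hy1]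
  rw [pv_pyGetD_map_pyRange_one_int _ 1 (w-1) (x-1) _ (by omega) (by omega)]
  rw [show (1 + (x - 1)) = x from by ring]
  rw [PySem.List.pyGetD_map_pyRange_of_nonneg _ _ _ _ hc0 hc1]

theorem pv_entryEq (pixels : List (List (List Int))) (h w y x : Int)
    (hy : 1 ≤ y) (hy2 : y < h - 1) (hx : 1 ≤ x) (hx2 : x < w - 1) :
    pvPx pixels y x [0,0,0] = (PySem.List.pyRange 0 3 1).map (fun c =>
      pvClamp (9 * pvGet3 pixels y x c -
        (pvGet3 (pvH pixels h w) (y-1) (x-1) c + pvGet3 (pvH pixels h w) y (x-1) c +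
          pvGet3 (pvH pixels h w) (y+1) (x-1) c))) := by
  have hcomp : ∀ c : Int, 0 ≤ c → c < 3 →
      pvClamp (pvNV pixels y x c)
        = pvClamp (9 * pvGet3 pixels y x c -
            (pvGet3 (pvH pixels h w) (y-1) (x-1) c + pvGet3 (pvH pixels h w) y (x-1) c +
              pvGet3 (pvH pixels h w) (y+1) (x-1) c)) := by
    intro c hc0 hc1
    rw [pv_nv_eq]
    rw [pv_getH pixels h w (y-1) x c (by omega) (by omega) hx hx2 hc0 hc1]
    rw [pv_getH pixels h w y x c (by omega) (by omega) hx hx2 hc0 hc1]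
    rw [pv_getH pixels h w (y+1) x c (by omega) (by omega) hx hx2 hc0 hc1]
  unfold pvPx
  rw [pv_px_eval (fun c => pvClamp (pvNV pixels y x c))]
  rw [show PySem.List.pyRange 0 3 1 = [0,1,2] from by decide]
  simp only [List.map]
  rw [hcomp 0 (by norm_num) (by norm_num), hcomp 1 (by norm_num) (by norm_num),
    hcomp 2 (by norm_num) (by norm_num)]

theorem pv_const_map_pyRange_getElem {β : Type} (z : β) (w : Int) (i : Nat) :
    ((PySem.List.pyRange 0 w 1).map (fun _ => z))[i]? = if (i:Int) < w then some z else none := by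
  rw [List.getElem?_map, PySem.List.getElem?_pyRange_one]
  by_cases hi : i < (w - 0).toNat
  · rw [if_pos hi, if_pos (by omega)]
    rfl
  · rw [if_neg hi, if_neg (by omega)]
    rfl

theorem pv_bRow_getElem {β : Type} (f : Int → β) (z : β) (w : Int) (hw : 3 ≤ w) (i : Nat) :
    ([z] ++ (PySem.List.pyRange 1 (w-1) 1).map f ++ [z])[i]? =
      if (i:Int) < w then
        (if 1 ≤ (i:Int) ∧ (i:Int) < w - 1 then some (f i) else some z)
      else none := by
  have hmid : ((PySem.List.pyRange 1 (w-1) 1).map f).length = (w-2).toNat := by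
    rw [List.length_map, PySem.List.length_pyRange_one]
    omega
  have hlen : ([z] ++ (PySem.List.pyRange 1 (w-1) 1).map f).length = (w-1).toNat := by
    simp only [List.length_append, List.length_singleton, hmid]
    omega
  by_cases h0 : i = 0
  · subst h0
    rw [List.getElem?_append_left (by omega), List.getElem?_append_left (by simp)]
    rw [if_pos (by omega), if_neg (by omega)]
    rfl
  · by_cases h1 : (i:Int) < w - 1
    · -- interior: index into the middle map
      rw [List.getElem?_append_left (by omega)]
      rw [List.getElem?_append_right (l₁ := [z]) (by simp only [List.length_singleton]; omega)]
      rw [List.getElem?_map, PySem.List.getElem?_pyRange_one]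
      rw [if_pos (by simp only [List.length_singleton]; omega)]
      rw [if_pos (by omega), if_pos (by omega)]
      simp only [List.length_singleton, Option.map_some]
      congr 2
      omega
    · by_cases h2 : (i:Int) < w
      · -- the right border cell
        rw [List.getElem?_append_right (by omega)]
        rw [if_pos h2, if_neg (by omega)]
        rw [show i - ([z] ++ (PySem.List.pyRange 1 (w-1) 1).map f).length = 0 from by omega]
        rfl
      · rw [List.getElem?_eq_none (by simp only [List.length_append, List.length_singleton, hmid]; omega), if_neg (by omega)]

theorem pv_rowEq (pixels : List (List (List Int))) (h w y : Int)
    (hw : 3 ≤ w) (hy : 1 ≤ y) (hy2 : y < h - 1) :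
    pvRow pixels w y ((PySem.List.pyRange 0 w 1).map (fun _ => ([0,0,0] : List Int)))
      = [([0,0,0] : List Int)] ++ (PySem.List.pyRange 1 (w-1) 1).map (fun x =>
          (PySem.List.pyRange 0 3 1).map (fun c =>
            pvClamp (9 * pvGet3 pixels y x c -
              (pvGet3 (pvH pixels h w) (y-1) (x-1) c + pvGet3 (pvH pixels h w) y (x-1) c +
                pvGet3 (pvH pixels h w) (y+1) (x-1) c)))) ++ [([0,0,0] : List Int)] := by
  apply List.ext_getElem?
  intro i
  unfold pvRow
  rw [pv_foldl_modify_pyRange' (pvPx pixels y) 1 (w-1) (by omega)]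
  rw [pv_bRow_getElem _ _ _ hw, pv_const_map_pyRange_getElem]
  by_cases hin : 1 ≤ (i:Int) ∧ (i:Int) < w - 1
  · rw [if_pos hin, if_pos (by omega), if_pos hin, if_pos (by omega)]
    simp only [Option.map_some]
    rw [pv_entryEq pixels h w y i hy hy2 (by omega) (by omega)]
  · rw [if_neg hin]
    by_cases h2 : (i:Int) < w
    · rw [if_pos h2, if_pos h2, if_neg hin]
    · rw [if_neg h2, if_neg h2]

theorem pv_hA (pixels : List (List (List Int))) (h w : Int) :
    apply_convolution pixels h w = (PySem.List.pyRange 1 (h-1) 1).foldl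
      (fun o y => o.modify y.toNat (pvRow pixels w y))
      ((PySem.List.pyRange 0 h 1).map (fun _ =>
        (PySem.List.pyRange 0 w 1).map (fun _ => ([0,0,0] : List Int)))) := by
  unfold apply_convolution pvRow pvPx pvNV
  simp only [pv_foldl_modify_same]

theorem pv_hB (pixels : List (List (List Int))) (h w : Int) (hh : 3 ≤ h) (hw : 3 ≤ w) :
    apply_convolution_alt pixels h w = (PySem.List.pyRange 0 h 1).map (fun y =>
      if y = 0 ∨ y = h - 1 then
        (PySem.List.pyRange 0 w 1).map (fun _ => ([0,0,0] : List Int))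
      else
        [([0,0,0] : List Int)] ++
        (PySem.List.pyRange 1 (w-1) 1).map (fun x =>
          (PySem.List.pyRange 0 3 1).map (fun c =>
            pvClamp (9 * pvGet3 pixels y x c -
              (pvGet3 (pvH pixels h w) (y-1) (x-1) c + pvGet3 (pvH pixels h w) y (x-1) c +
                pvGet3 (pvH pixels h w) (y+1) (x-1) c)))) ++
        [([0,0,0] : List Int)]) := by
  unfold apply_convolution_alt pvH
  rw [if_neg (by omega)]

theorem pv_AB (pixels : List (List (List Int))) (h w : Int) :
    apply_convolution pixels h w = apply_convolution_alt pixels h w := by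
  by_cases hs : h < 3 ∨ w < 3
  · unfold apply_convolution apply_convolution_alt
    rw [if_pos hs]
    rcases hs with hh | hw
    · rw [PySem.List.pyRange_one_eq_nil (show h - 1 ≤ 1 by omega)]
      simp only [List.foldl_nil]
    · rw [PySem.List.pyRange_one_eq_nil (show w - 1 ≤ 1 by omega)]
      simp only [List.foldl_nil]
      rw [pv_foldl_id]
  · rw [not_or, not_lt, not_lt] at hs
    obtain ⟨hh, hw⟩ := hs
    rw [pv_hA, pv_hB pixels h w hh hw]
    apply List.ext_getElem?
    intro j
    rw [pv_foldl_modify_pyRange' (pvRow pixels w) 1 (h-1) (by omega)]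
    rw [pv_const_map_pyRange_getElem]
    rw [List.getElem?_map, PySem.List.getElem?_pyRange_one]
    by_cases hjh : (j:Int) < h
    · rw [if_pos (show j < (h - 0).toNat by omega), if_pos hjh]
      simp only [Option.map_some, zero_add]
      by_cases hin : 1 ≤ (j:Int) ∧ (j:Int) < h - 1
      · rw [if_pos hin, if_neg (by omega)]
        rw [pv_rowEq pixels h w j hw hin.1 hin.2]
      · rw [if_neg hin, if_pos (by omega)]
    · rw [if_neg (show ¬ j < (h - 0).toNat by omega), if_neg hjh]
      rw [if_neg (by omega)]
      simp only [Option.map_none]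

-- ===== VERDICT (by name: the statement is the Claim_ definition above) =====
theorem apply_convolution_spec : Claim_equal_apply_convolution := by
  intro pixels height width _ _
  unfold Spec_apply_convolution
  exact pv_AB pixels height width
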